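-- pv_equiv track=rewrite | github.com/poezio/poezio | poezio/core/core.py | separate_chars_from_bindings
-- ===== SOURCE A (Python) =====
-- from typing import Callable, Dict, List, Optional, Tuple, Type
--
-- def separate_chars_from_bindings(char_list: List[str]) -> List[List[str]]:
--     """
--     returns a list of lists. For example if you give
--     ['a', 'b', 'KEY_BACKSPACE', 'n', 'u'], this function returns
--     [['a', 'b'], ['KEY_BACKSPACE'], ['n', 'u']]
--
--     This way, in case of lag (for example), we handle the typed text
--     by “batch” as much as possible (instead of one char at a time,
--     which implies a refresh after each char, which is very slow),
--     but we still handle the special chars (backspaces, arrows,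
--     ctrl+x ou alt+x, etc) one by one, which avoids the issue of
--     printing them OR ignoring them in that case.  This should
--     resolve the “my ^W are ignored when I lag ;(”.
--     """
--     res = []
--     current = []
--     for char in char_list:
--         assert char
--         # Transform that stupid char into what we actually meant
--         if char == '\x1f':
--             char = '^/'
--         if len(char) == 1:
--             current.append(char)
--         else:
--             # special case for the ^I key, it’s considered as \t
--             # only when pasting some text, otherwise that’s the ^I
--             # (or M-i) key, which stands for completion by default.
--             if char == '^I' and len(char_list) != 1:
--                 current.append('\t')
--                 continue
--             if current:
--                 res.append(current)
--                 current = []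
--             res.append([char])
--     if current:
--         res.append(current)
--     return res
-- ===== SOURCE B (Python) =====
-- def separate_chars_from_bindings(char_list):
--     n = len(char_list)
--     # pass 1: normalize each key and tag it special (len > 1) or normal
--     tagged = []
--     for char in char_list:
--         assert char
--         if char == '\x1f':
--             char = '^/'
--         if char == '^I' and n != 1:
--             char = '\t'
--         tagged.append((char, len(char) > 1))
--     # pass 2: group by the tag: each maximal normal run -> one batch,
--     # each special token -> its own singleton
--     res = []
--     i = 0
--     while i < len(tagged):
--         if tagged[i][1]:
--             res.append([tagged[i][0]])
--             i += 1
--         else: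
--             j = i
--             while j < len(tagged) and not tagged[j][1]:
--                 j += 1
--             res.append([tok for tok, _ in tagged[i:j]])
--             i = j
--     return res
-- ===== Notes on version B (the rewrite author's own statement) =====
-- stated objective: alternative
-- what changed: Replaced A's single fold carrying (res, current) accumulators by a two-pass map-then-group decomposition: first normalize and tag every key as special/normal, then group maximal normal runs into batches.
import Mathlib
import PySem

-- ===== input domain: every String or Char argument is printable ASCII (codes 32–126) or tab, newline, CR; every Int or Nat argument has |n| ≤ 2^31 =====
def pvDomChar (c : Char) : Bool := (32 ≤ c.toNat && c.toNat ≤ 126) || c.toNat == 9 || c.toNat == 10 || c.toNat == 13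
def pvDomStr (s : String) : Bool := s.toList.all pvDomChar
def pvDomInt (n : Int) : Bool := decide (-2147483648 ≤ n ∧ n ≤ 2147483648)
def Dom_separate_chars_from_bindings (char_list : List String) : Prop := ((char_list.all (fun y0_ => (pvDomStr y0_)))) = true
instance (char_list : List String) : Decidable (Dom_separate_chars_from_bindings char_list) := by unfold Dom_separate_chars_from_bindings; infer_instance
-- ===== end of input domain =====

-- B replaces A's single fold carrying (res, current) by a two-pass normalize-and-tag
-- then group-runs decomposition (alternative, same cost); Pre_ excludes inputs containing
-- an empty string, where both programs' `assert char` raises AssertionError.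


-- ===== PORT A =====
-- A's for-loop over char_list carrying (res, current); n is len(char_list)
-- (the list is never mutated, so the original length is its length at every check).
def sepLoopA (n : Nat) (res : List (List String)) (current : List String) :
    List String → List (List String)
  | [] => if current ≠ [] then res ++ [current] else res
  | char :: rest =>
    let char := if char = "\x1f" then "^/" else char
    if PySem.Str.len char = 1 then
      sepLoopA n res (current ++ [char]) rest
    else if char = "^I" ∧ n ≠ 1 then
      sepLoopA n res (current ++ ["\t"]) rest
    else if current ≠ [] then
      sepLoopA n (res ++ [current] ++ [[char]]) [] rest
    else
      sepLoopA n (res ++ [[char]]) [] rest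

def separate_chars_from_bindings (char_list : List String) : List (List String) :=
  sepLoopA char_list.length [] [] char_list

-- ===== PORT B =====
-- pass 1 of Source B: normalize one key and tag it special (len > 1) or normal
def sepPrep (n : Nat) (char : String) : String × Bool :=
  let char := if char = "\x1f" then "^/" else char
  let char := if char = "^I" ∧ n ≠ 1 then "\t" else char
  (char, decide (1 < PySem.Str.len char))

-- pass 2 of Source B: the while-loop over indices i/j grouping maximal normal runs into
-- batches; the index progression is rendered as fuel-bounded recursion (fuel = length,
-- exactly the loop bound), the inner j-scan as the takeWhile/dropWhile split of the run.
def sepAssemble : Nat → List (String × Bool) → List (List String)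
  | _, [] => []
  | 0, _ => []   -- unreachable: fuel starts at the list length and dominates it
  | fuel + 1, (c, true) :: rest => [c] :: sepAssemble fuel rest
  | fuel + 1, (c, false) :: rest =>
    (c :: (rest.takeWhile (fun p => p.2 = false)).map (·.1)) ::
      sepAssemble fuel (rest.dropWhile (fun p => p.2 = false))

def separate_chars_from_bindings_alt (char_list : List String) : List (List String) :=
  let tagged := char_list.map (sepPrep char_list.length)
  sepAssemble tagged.length tagged

-- ===== PRECONDITION & SPEC =====
-- Pre_ excludes exactly the inputs where both Pythons' `assert char` raises AssertionError.
def Pre_separate_chars_from_bindings (char_list : List String) : Prop := "" ∉ char_list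
instance (char_list : List String) : Decidable (Pre_separate_chars_from_bindings char_list) := by
  unfold Pre_separate_chars_from_bindings; infer_instance

def pvWitness_separate_chars_from_bindings : List String :=
  ["a", "b", "KEY_BACKSPACE", "n", "u"]

def Spec_separate_chars_from_bindings (char_list : List String) (out : List (List String)) : Prop := out = separate_chars_from_bindings_alt char_list
instance (char_list : List String) (out : List (List String)) : Decidable (Spec_separate_chars_from_bindings char_list out) := by unfold Spec_separate_chars_from_bindings; infer_instance

-- ===== CLAIM (what is proved, stated in full; the proofs are below) =====
def Claim_equal_separate_chars_from_bindings : Prop := ∀ (char_list : List String), Dom_separate_chars_from_bindings char_list → Pre_separate_chars_from_bindings char_list → Spec_separate_chars_from_bindings char_list (separate_chars_from_bindings char_list)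

-- ===== LEMMAS AND PROOFS =====

-- what B's grouping does when entered with a pending (possibly non-empty) batch
def sepGlue (cur : List String) : List (String × Bool) → List (List String)
  | [] => if cur = [] then [] else [cur]
  | (c, false) :: rest => sepGlue (cur ++ [c]) rest
  | (c, true) :: rest => (if cur = [] then [] else [cur]) ++ [c] :: sepGlue [] rest

theorem sepGlue_ne (tl : List (String × Bool)) :
    ∀ cur : List String, cur ≠ [] →
      sepGlue cur tl =
        (cur ++ (tl.takeWhile (fun p => p.2 = false)).map (·.1)) ::
          sepGlue [] (tl.dropWhile (fun p => p.2 = false)) := by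
  induction tl with
  | nil => intro cur h; simp [sepGlue, h]
  | cons hd rest ih =>
    obtain ⟨c, b⟩ := hd
    intro cur h
    cases b with
    | true => simp [sepGlue, List.takeWhile, List.dropWhile, h]
    | false =>
      rw [show sepGlue cur ((c, false) :: rest) = sepGlue (cur ++ [c]) rest from rfl,
          ih (cur ++ [c]) (by simp)]
      simp [List.takeWhile, List.dropWhile]

-- B's fueled grouping equals sepGlue started with an empty batch
theorem sepAssemble_eq_glue :
    ∀ (fuel : Nat) (tl : List (String × Bool)), tl.length ≤ fuel →
      sepAssemble fuel tl = sepGlue [] tl := by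
  intro fuel
  induction fuel with
  | zero => intro tl h; rw [List.length_eq_zero_iff.mp (Nat.le_zero.mp h)]; rfl
  | succ fuel ih =>
    intro tl h
    match tl with
    | [] => rfl
    | (c, true) :: rest =>
      simp only [sepAssemble, sepGlue, ih rest (by simpa using Nat.le_of_succ_le_succ h)]
      simp
    | (c, false) :: rest =>
      rw [show sepAssemble (fuel + 1) ((c, false) :: rest) =
            (c :: (rest.takeWhile (fun p => p.2 = false)).map (·.1)) ::
              sepAssemble fuel (rest.dropWhile (fun p => p.2 = false)) from rfl,
          ih _ (le_trans (List.length_dropWhile_le _ _) (by simpa using Nat.le_of_succ_le_succ h)),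
          show sepGlue [] ((c, false) :: rest) = sepGlue [c] rest from rfl,
          sepGlue_ne rest [c] (by simp)]
      simp

-- main loop invariant: A's fold equals res ++ B's grouping of the prepped tail
theorem sepLoopA_eq (n : Nat) (l : List String) :
    ∀ (res : List (List String)) (cur : List String), "" ∉ l →
      sepLoopA n res cur l = res ++ sepGlue cur (l.map (sepPrep n)) := by
  induction l with
  | nil => intro res cur _; cases h : cur <;> simp [sepLoopA, sepGlue]
  | cons char rest ih =>
    intro res cur hne
    have hch : char ≠ "" := fun h => hne (by simp [h])
    have hrest : "" ∉ rest := fun h => hne (List.mem_cons_of_mem _ h)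
    by_cases h1 : PySem.Str.len (if char = "\x1f" then "^/" else char) = 1
    · -- normal single-char key: appended to the pending batch on both sides
      have hni : ¬((if char = "\x1f" then "^/" else char) = "^I" ∧ n ≠ 1) := by
        rintro ⟨he, -⟩; rw [he] at h1; simp [PySem.Str.len_eq] at h1
      have hprep : sepPrep n char = ((if char = "\x1f" then "^/" else char), false) := by
        simp only [sepPrep, if_neg hni]
        rw [h1]; simp
      rw [show sepLoopA n res cur (char :: rest) =
            sepLoopA n res (cur ++ [if char = "\x1f" then "^/" else char]) rest from by
          simp only [sepLoopA, if_pos h1],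
        ih _ _ hrest, List.map_cons, hprep]
      rfl
    · by_cases hti : (if char = "\x1f" then "^/" else char) = "^I" ∧ n ≠ 1
      · -- pasted tab: '^I' becomes '\t', a normal key, on both sides
        have hprep : sepPrep n char = ("\t", false) := by
          simp only [sepPrep, if_pos hti]; rfl
        rw [show sepLoopA n res cur (char :: rest) =
              sepLoopA n res (cur ++ ["\t"]) rest from by
            simp only [sepLoopA, if_neg h1, if_pos hti],
          ih _ _ hrest, List.map_cons, hprep]
        rfl
      · -- special key: flush the pending batch and emit a singleton on both sides
        have hgt : 1 < PySem.Str.len (if char = "\x1f" then "^/" else char) := by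
          have hne' : (if char = "\x1f" then "^/" else char) ≠ "" := by
            split_ifs with hx
            · decide
            · exact hch
          have h0 : PySem.Str.len (if char = "\x1f" then "^/" else char) ≠ 0 := by
            simp [PySem.Str.len_eq]; exact hne'
          have hnn : 0 ≤ PySem.Str.len (if char = "\x1f" then "^/" else char) := by
            rw [PySem.Str.len_eq]; positivity
          omega
        have hprep : sepPrep n char = ((if char = "\x1f" then "^/" else char), true) := by
          simp only [sepPrep, if_neg hti, decide_eq_true hgt]
        rw [show sepLoopA n res cur (char :: rest) =
              (if cur ≠ [] then
                sepLoopA n (res ++ [cur] ++ [[if char = "\x1f" then "^/" else char]]) [] rest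
              else
                sepLoopA n (res ++ [[if char = "\x1f" then "^/" else char]]) [] rest) from by
            simp only [sepLoopA, if_neg h1, if_neg hti],
          List.map_cons, hprep,
          show sepGlue cur (((if char = "\x1f" then "^/" else char), true) :: rest.map (sepPrep n)) =
              (if cur = [] then [] else [cur]) ++
                [if char = "\x1f" then "^/" else char] :: sepGlue [] (rest.map (sepPrep n)) from rfl]
        by_cases hc : cur = []
        · rw [if_neg, if_pos hc, ih _ _ hrest]
          · simp
          · simp [hc]
        · rw [if_pos hc, if_neg hc, ih _ _ hrest]
          simp

-- ===== VERDICT (by name: the statement is the Claim_ definition above) =====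
theorem separate_chars_from_bindings_spec : Claim_equal_separate_chars_from_bindings := by
  intro char_list _ hpre
  unfold Spec_separate_chars_from_bindings separate_chars_from_bindings separate_chars_from_bindings_alt
  rw [sepAssemble_eq_glue _ _ le_rfl, sepLoopA_eq _ _ _ _ hpre, List.nil_append]
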